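-- pv_equiv track=rewrite | github.com/andrew-taylor-2/sgfication | sgfication/img_functions.py | group_intersections_by_axis
-- ===== SOURCE A (Python) =====
-- def group_intersections_by_axis(intersections):
--     # Separate intersections into rows and columns based on their coordinates
--     rows = {}
--     columns = {}
--     for x, y in intersections:
--         # Group by y-coordinate for rows
--         if y not in rows:
--             rows[y] = []
--         rows[y].append((x, y))
--
--         # Group by x-coordinate for columns
--         if x not in columns:
--             columns[x] = []
--         columns[x].append((x, y))
--
--     # While the above works, it seems inefficient to store both x and y when one of them is the key. still, this does
--     #   make for less clunky looking code
--
--     # Sort intersections in each row and column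
--     for k in rows:
--         rows[k].sort(key=lambda coord: coord[0])  # Sort by x-coordinate
--     for k in columns:
--         columns[k].sort(key=lambda coord: coord[1])  # Sort by y-coordinate
--
--     return rows, columns
-- ===== SOURCE B (Python) =====
-- def group_intersections_by_axis(intersections):
--     # Different decomposition: dedup the keys once (first-occurrence order),
--     # then build each bucket directly as a sorted filter of the point list.
--     pts = [(x, y) for x, y in intersections]
--     row_keys = dict.fromkeys(y for _, y in pts)
--     col_keys = dict.fromkeys(x for x, _ in pts)
--     rows = {k: sorted((p for p in pts if p[1] == k), key=lambda p: p[0])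
--             for k in row_keys}
--     columns = {k: sorted((p for p in pts if p[0] == k), key=lambda p: p[1])
--                for k in col_keys}
--     return rows, columns
-- ===== Notes on version B (the rewrite author's own statement) =====
-- stated objective: alternative
-- what changed: Replaces A's incremental bucket mutation (grow two dicts point by point, then sort every bucket in a second mutation pass) by a declarative build: dedup the row/column keys once via dict.fromkeys and construct each bucket directly as a sorted filter of the point list.
import Mathlib
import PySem

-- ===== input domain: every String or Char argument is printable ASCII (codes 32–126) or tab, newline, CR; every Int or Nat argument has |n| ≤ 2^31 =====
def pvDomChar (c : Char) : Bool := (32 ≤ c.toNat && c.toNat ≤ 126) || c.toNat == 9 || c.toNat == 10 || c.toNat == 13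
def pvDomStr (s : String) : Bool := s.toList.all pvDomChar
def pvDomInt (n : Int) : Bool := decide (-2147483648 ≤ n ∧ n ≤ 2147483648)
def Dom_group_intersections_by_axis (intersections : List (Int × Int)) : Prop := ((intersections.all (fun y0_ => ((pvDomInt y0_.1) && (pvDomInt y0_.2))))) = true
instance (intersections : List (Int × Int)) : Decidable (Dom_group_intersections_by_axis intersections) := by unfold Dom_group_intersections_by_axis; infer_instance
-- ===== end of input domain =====

-- B replaces A's incremental bucket mutation (grow two dicts point by point, then sort every
-- bucket in a second pass) by a declarative build: dedup the keys once, then each bucket is a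
-- sorted filter of the point list (alternative decomposition, similar cost).


-- ===== PORT A =====
-- literal transliteration of A: one loop growing both dicts ('if key not in d: d[key] = []'
-- then 'd[key].append(p)'), then a loop over each dict's keys sorting that bucket in place.
def group_intersections_by_axis (intersections : List (Int × Int)) : (List (Int × List (Int × Int))) × (List (Int × List (Int × Int))) :=
  let rc : PySem.Dict Int (List (Int × Int)) × PySem.Dict Int (List (Int × Int)) :=
    intersections.foldl (fun rc p =>
      let rows := if rc.1.contains p.2 then rc.1 else rc.1.insert p.2 []
      let rows := rows.insert p.2 (rows.getD p.2 [] ++ [p])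
      let columns := if rc.2.contains p.1 then rc.2 else rc.2.insert p.1 []
      let columns := columns.insert p.1 (columns.getD p.1 [] ++ [p])
      (rows, columns)) (PySem.Dict.empty, PySem.Dict.empty)
  let rows := rc.1.keys.foldl (fun d k => d.insert k (PySem.List.sorted (d.getD k []) (fun c => c.1))) rc.1
  let columns := rc.2.keys.foldl (fun d k => d.insert k (PySem.List.sorted (d.getD k []) (fun c => c.2))) rc.2
  (rows.items, columns.items)

-- ===== PORT B =====
-- literal transliteration of B (Source B): dedup the keys, bucket = sorted filter.
def group_intersections_by_axis_alt (intersections : List (Int × Int)) : (List (Int × List (Int × Int))) × (List (Int × List (Int × Int))) :=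
  let pts := intersections.map (fun p => (p.1, p.2))
  let rowKeys := PySem.List.dedup (pts.map (fun p => p.2))
  let colKeys := PySem.List.dedup (pts.map (fun p => p.1))
  let rows := rowKeys.map (fun k => (k, PySem.List.sorted (pts.filter (fun p => p.2 == k)) (fun p => p.1)))
  let columns := colKeys.map (fun k => (k, PySem.List.sorted (pts.filter (fun p => p.1 == k)) (fun p => p.2)))
  (rows, columns)

-- ===== PRECONDITION & SPEC =====
def Spec_group_intersections_by_axis (intersections : List (Int × Int)) (out : (List (Int × List (Int × Int))) × (List (Int × List (Int × Int)))) : Prop := out = group_intersections_by_axis_alt intersections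
instance (intersections : List (Int × Int)) (out : (List (Int × List (Int × Int))) × (List (Int × List (Int × Int)))) : Decidable (Spec_group_intersections_by_axis intersections out) := by unfold Spec_group_intersections_by_axis; infer_instance

-- ===== CLAIM (what is proved, stated in full; the proofs are below) =====
def Claim_equal_group_intersections_by_axis : Prop := ∀ (intersections : List (Int × Int)), Dom_group_intersections_by_axis intersections → Spec_group_intersections_by_axis intersections (group_intersections_by_axis intersections)

-- ===== LEMMAS AND PROOFS =====

-- A's 'if key not in d: d[key] = []' followed by the append IS Dict.modify.
theorem pv_step_eq_modify (d : PySem.Dict Int (List (Int × Int))) (k : Int) (p : Int × Int) :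
    (let d1 := if d.contains k then d else d.insert k ([] : List (Int × Int))
     d1.insert k (d1.getD k [] ++ [p])) = d.modify k [] (fun v => v ++ [p]) := by
  by_cases h : d.contains k = true
  · simp [h, PySem.Dict.modify]
  · simp only [Bool.not_eq_true] at h
    simp [h, PySem.Dict.modify, PySem.Dict.getD_insert_self, PySem.Dict.insert_insert_self,
      PySem.Dict.getD_of_not_contains d ([] : List (Int × Int)) h]

-- the bucket a modify-append loop leaves at key c, keyed by a projection
theorem pv_getD_bucket (key : Int × Int → Int) (l : List (Int × Int)) (c : Int) :
    ((l.foldl (fun d p => d.modify (key p) [] (fun v => v ++ [p])) PySem.Dict.empty).getD c []) =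
      l.filter (fun p => key p == c) := by
  have h := PySem.Dict.getD_foldl_modify_append (l.map (fun p => (key p, p)))
      (PySem.Dict.empty : PySem.Dict Int (List (Int × Int))) c
  rw [List.foldl_map] at h
  simp at h
  rw [List.filter_map, List.map_map] at h
  simp only [Function.comp_def] at h
  simpa using h

-- after the sort pass (insert of a function of the old bucket, over a Nodup key list)
theorem pv_getD_sortpass (g : List (Int × Int) → List (Int × Int)) (c : Int) :
    ∀ (ks : List Int) (d : PySem.Dict Int (List (Int × Int))), ks.Nodup →
    ((ks.foldl (fun d k => d.insert k (g (d.getD k []))) d).getD c []) =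
      if c ∈ ks then g (d.getD c []) else d.getD c [] := by
  intro ks
  induction ks with
  | nil => intro d _; simp
  | cons k rest ih =>
    intro d hnd
    simp only [List.foldl_cons]
    rw [ih _ (List.Nodup.of_cons hnd)]
    by_cases hc : c ∈ rest
    · have hck : c ≠ k := by rintro rfl; exact (List.nodup_cons.mp hnd).1 hc
      simp [hc, PySem.Dict.getD_insert_of_ne d _ ([] : List (Int × Int)) hck]
    · by_cases hck : c = k
      · subst hck; simp [hc, PySem.Dict.getD_insert_self]
      · simp [hc, hck, PySem.Dict.getD_insert_of_ne d _ ([] : List (Int × Int)) hck]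

-- updating a Nodup set with itself adds nothing
theorem pv_update_self (s : PySem.Set Int) (h : s.Nodup) : PySem.Set.update s s = s := by
  rw [PySem.Set.update_eq_append_filter, PySem.Set.ofList_eq_self_of_nodup _ h]
  have hnil : List.filter (fun y => !PySem.Set.contains s y) s = [] := by
    apply List.filter_eq_nil_iff.mpr
    intro y hy
    simp [hy]
  rw [hnil, List.append_nil]

-- one axis of A (bucket loop then in-place sort pass) equals one axis of B (dedup + sorted filter)
theorem pv_axis (key : Int × Int → Int) (l : List (Int × Int))
    (srt : List (Int × Int) → List (Int × Int)) (d : PySem.Dict Int (List (Int × Int)))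
    (hd : d = l.foldl (fun d p => d.modify (key p) [] (fun v => v ++ [p])) PySem.Dict.empty) :
    ((d.keys.foldl (fun d k => d.insert k (srt (d.getD k []))) d).items) =
      (PySem.List.dedup (l.map key)).map (fun k => (k, srt (l.filter (fun p => key p == k)))) := by
  have hkeys : d.keys = PySem.Set.ofList (l.map key) := by
    rw [hd, PySem.Dict.keys_foldl_modify_key l key ([] : List (Int × Int)) (fun _ p => (fun v => v ++ [p]))]
    simp [PySem.Dict.keys_empty, PySem.Set.update_nil_left]
  have hnd : d.keys.Nodup := by
    rw [hkeys]; exact PySem.Set.nodup_ofList _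
  set d2 := d.keys.foldl (fun d k => d.insert k (srt (d.getD k []))) d with hd2
  have hkeys2 : d2.keys = d.keys := by
    rw [hd2, PySem.Dict.keys_foldl_insert d.keys (fun d k => srt (d.getD k [])) d]
    exact pv_update_self _ hnd
  have hnd2 : d2.keys.Nodup := by rw [hkeys2]; exact hnd
  rw [PySem.Dict.items_eq_map_keys d2 hnd2 ([] : List (Int × Int)), hkeys2]
  have hdedup : PySem.List.dedup (l.map key) = d.keys := by
    rw [hkeys]; simp
  rw [hdedup]
  apply List.map_congr_left
  intro k hk
  have hg : d2.getD k [] = srt (d.getD k []) := by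
    rw [hd2, pv_getD_sortpass srt k d.keys d hnd]
    simp [hk]
  rw [hg, hd, pv_getD_bucket]

-- ===== VERDICT (by name: the statement is the Claim_ definition above) =====
theorem group_intersections_by_axis_spec : Claim_equal_group_intersections_by_axis := by
  unfold Claim_equal_group_intersections_by_axis Spec_group_intersections_by_axis
  intro l _
  show group_intersections_by_axis l = group_intersections_by_axis_alt l
  unfold group_intersections_by_axis group_intersections_by_axis_alt
  have hf : (fun (rc : PySem.Dict Int (List (Int × Int)) × PySem.Dict Int (List (Int × Int))) (p : Int × Int) =>
      let rows := if rc.1.contains p.2 then rc.1 else rc.1.insert p.2 []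
      let rows := rows.insert p.2 (rows.getD p.2 [] ++ [p])
      let columns := if rc.2.contains p.1 then rc.2 else rc.2.insert p.1 []
      let columns := columns.insert p.1 (columns.getD p.1 [] ++ [p])
      (rows, columns))
      = (fun rc p => (rc.1.modify p.2 [] (fun v => v ++ [p]), rc.2.modify p.1 [] (fun v => v ++ [p]))) := by
    funext rc p
    show (_, _) = _
    rw [pv_step_eq_modify rc.1 p.2 p, pv_step_eq_modify rc.2 p.1 p]
  simp only [hf]
  rw [PySem.List.foldl_prod_mk (f := fun d (p : Int × Int) => PySem.Dict.modify d p.2 [] (fun v => v ++ [p]))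
      (g := fun d (p : Int × Int) => PySem.Dict.modify d p.1 [] (fun v => v ++ [p]))]
  have h1 := pv_axis (fun p => p.2) l (fun b => PySem.List.sorted b (fun c => c.1)) _ rfl
  have h2 := pv_axis (fun p => p.1) l (fun b => PySem.List.sorted b (fun c => c.2)) _ rfl
  simp only [] at h1 h2
  simp only [Prod.mk.eta, List.map_id']
  exact Prod.ext (by rw [h1]) (by rw [h2])
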